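-- pv_equiv track=rewrite | github.com/Abrikoskas/DPO | HW1_dpo/main.py | calc_hist
-- ===== SOURCE A (Python) =====
-- def calc_hist(input_list):
--     hist = [0]*10
--     for num in input_list:
--         if num < 100:
--             hist[0] += 1
--         elif num < 200:
--             hist[1] += 1
--         elif num < 300:
--             hist[2] += 1
--         elif num < 400:
--             hist[3] += 1
--         elif num < 500:
--             hist[4] += 1
--         elif num < 600:
--             hist[5] += 1
--         elif num < 700:
--             hist[6] += 1
--         elif num < 800:
--             hist[7] += 1
--         elif num < 900:
--             hist[8] += 1
--         elif num < 1000: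
--             hist[9] += 1
--     return hist
-- ===== SOURCE B (Python) =====
-- def calc_hist(input_list):
--     hist = [0] * 10
--     for num in input_list:
--         if num < 1000:
--             idx = num // 100
--             if idx < 0:
--                 idx = 0
--             hist[idx] += 1
--     return hist
-- ===== Notes on version B (the rewrite author's own statement) =====
-- stated objective: idiomatic
-- what changed: Replaces the ten-branch elif ladder with direct arithmetic bin indexing (idx = num // 100, negatives clamped to bin 0, num >= 1000 skipped).
import Mathlib
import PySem

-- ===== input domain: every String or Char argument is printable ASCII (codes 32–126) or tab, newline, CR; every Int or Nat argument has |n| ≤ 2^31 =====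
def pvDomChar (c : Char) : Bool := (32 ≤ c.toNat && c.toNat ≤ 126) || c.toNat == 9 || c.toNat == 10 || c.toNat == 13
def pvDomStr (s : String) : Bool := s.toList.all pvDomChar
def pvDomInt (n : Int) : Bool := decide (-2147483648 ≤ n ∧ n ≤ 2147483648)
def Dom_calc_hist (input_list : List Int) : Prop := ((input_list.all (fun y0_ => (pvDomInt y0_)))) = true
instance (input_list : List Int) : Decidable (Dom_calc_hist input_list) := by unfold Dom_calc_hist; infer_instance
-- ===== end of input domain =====

-- B replaces A's ten-branch elif ladder with direct arithmetic bin indexing (idx = num // 100,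
-- clamped to 0 for negatives, num >= 1000 skipped), same O(n) cost; objective: idiomatic.

-- ===== PORT A =====
-- hist[i] += 1 on a 10-element list with a literal in-range index
def pvBump (hist : List Int) (i : Nat) : List Int := hist.set i (hist.getD i 0 + 1)

def calc_hist (input_list : List Int) : List Int :=
  input_list.foldl (fun hist num =>
    if num < 100 then pvBump hist 0
    else if num < 200 then pvBump hist 1
    else if num < 300 then pvBump hist 2
    else if num < 400 then pvBump hist 3
    else if num < 500 then pvBump hist 4
    else if num < 600 then pvBump hist 5
    else if num < 700 then pvBump hist 6
    else if num < 800 then pvBump hist 7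
    else if num < 900 then pvBump hist 8
    else if num < 1000 then pvBump hist 9
    else hist) [0, 0, 0, 0, 0, 0, 0, 0, 0, 0]

-- ===== PORT B =====
def calc_hist_alt (input_list : List Int) : List Int :=
  input_list.foldl (fun hist num =>
    if num < 1000 then
      let idx := PySem.Int.floordiv num 100
      let idx := if idx < 0 then 0 else idx
      pvBump hist idx.toNat
    else hist) [0, 0, 0, 0, 0, 0, 0, 0, 0, 0]

-- ===== PRECONDITION & SPEC =====
def Spec_calc_hist (input_list : List Int) (out : List Int) : Prop := out = calc_hist_alt input_list
instance (input_list : List Int) (out : List Int) : Decidable (Spec_calc_hist input_list out) := by unfold Spec_calc_hist; infer_instance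

-- ===== CLAIM (what is proved, stated in full; the proofs are below) =====
def Claim_equal_calc_hist : Prop := ∀ (input_list : List Int), Dom_calc_hist input_list → Spec_calc_hist input_list (calc_hist input_list)

-- ===== LEMMAS AND PROOFS =====
theorem pvStep_eq (hist : List Int) (num : Int) :
    (if num < 100 then pvBump hist 0
     else if num < 200 then pvBump hist 1
     else if num < 300 then pvBump hist 2
     else if num < 400 then pvBump hist 3
     else if num < 500 then pvBump hist 4
     else if num < 600 then pvBump hist 5
     else if num < 700 then pvBump hist 6
     else if num < 800 then pvBump hist 7
     else if num < 900 then pvBump hist 8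
     else if num < 1000 then pvBump hist 9
     else hist)
    = (if num < 1000 then
        let idx := PySem.Int.floordiv num 100
        let idx := if idx < 0 then 0 else idx
        pvBump hist idx.toNat
      else hist) := by
  have hfd : PySem.Int.floordiv num 100 = num / 100 :=
    PySem.Int.floordiv_eq_ediv_of_pos (by omega)
  simp only [hfd]
  split_ifs <;> first
  | rfl
  | (congr 1; omega)

theorem pvFold_eq (l : List Int) (hist : List Int) :
    l.foldl (fun hist num =>
      if num < 100 then pvBump hist 0
      else if num < 200 then pvBump hist 1
      else if num < 300 then pvBump hist 2
      else if num < 400 then pvBump hist 3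
      else if num < 500 then pvBump hist 4
      else if num < 600 then pvBump hist 5
      else if num < 700 then pvBump hist 6
      else if num < 800 then pvBump hist 7
      else if num < 900 then pvBump hist 8
      else if num < 1000 then pvBump hist 9
      else hist) hist
    = l.foldl (fun hist num =>
      if num < 1000 then
        let idx := PySem.Int.floordiv num 100
        let idx := if idx < 0 then 0 else idx
        pvBump hist idx.toNat
      else hist) hist := by
  induction l generalizing hist with
  | nil => rfl
  | cons x xs ih =>
    simp only [List.foldl_cons]
    rw [pvStep_eq]
    exact ih _

-- ===== VERDICT (by name: the statement is the Claim_ definition above) =====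
theorem calc_hist_spec : Claim_equal_calc_hist := by
  intro l _
  unfold Spec_calc_hist calc_hist calc_hist_alt
  exact pvFold_eq l _
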